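-- pv_equiv track=rewrite | github.com/renzhengyu/hacker-rank | hacker_rank_manasa_and_stones.py | stones
-- ===== SOURCE A (Python) =====
-- def stones(n, a, b):
--     if a==b:
--         return [(n-1)*a]
--     else:
--         low = a if a<b else b
--         delta = abs(a-b)
--         hi = low+delta
--         result = []
--         i = (n-1)*low
--         while i<=(n-1)*hi:
--             result.append(i)
--             i += delta
--         return result
-- ===== SOURCE B (Python) =====
-- def stones(n, a, b):
--     if a == b:
--         return [(n - 1) * a]
--     return sorted({a * i + b * (n - 1 - i) for i in range(n)})
-- ===== Notes on version B (the rewrite author's own statement) =====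
-- stated objective: idiomatic
-- what changed: Replaces the hand-rolled min/abs/while arithmetic-progression construction with a direct enumeration of every candidate final value a*i + b*(n-1-i), deduplicated through a set and sorted.
import Mathlib
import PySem

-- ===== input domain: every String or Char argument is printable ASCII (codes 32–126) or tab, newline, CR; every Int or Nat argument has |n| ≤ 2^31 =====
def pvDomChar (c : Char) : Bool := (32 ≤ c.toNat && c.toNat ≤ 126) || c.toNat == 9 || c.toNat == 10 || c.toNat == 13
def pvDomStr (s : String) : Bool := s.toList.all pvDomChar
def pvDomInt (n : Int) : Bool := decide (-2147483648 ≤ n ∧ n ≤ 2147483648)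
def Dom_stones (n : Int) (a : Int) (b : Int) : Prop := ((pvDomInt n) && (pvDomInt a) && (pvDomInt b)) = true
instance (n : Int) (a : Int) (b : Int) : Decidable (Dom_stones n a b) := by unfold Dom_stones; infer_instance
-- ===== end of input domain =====

-- B replaces A's min/abs/while arithmetic-progression construction with enumerate-dedup-sort
-- of the candidate values a*i + b*(n-1-i) (idiomatic; same return value, no side effects).

-- ===== PORT A =====
-- the while loop of A: 'while i <= hi: result.append(i); i += delta'
def stonesLoop (hi d : Int) (hd : 0 < d) (i : Int) : List Int :=
  if _h : i ≤ hi then i :: stonesLoop hi d hd (i + d) else []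
termination_by (hi + 1 - i).toNat
decreasing_by omega

def stones (n : Int) (a : Int) (b : Int) : List Int :=
  if h : a = b then [(n - 1) * a]
  else
    let low := if a < b then a else b
    let delta := |a - b|
    let hi := low + delta
    stonesLoop ((n - 1) * hi) delta (abs_pos.mpr (sub_ne_zero_of_ne h)) ((n - 1) * low)

-- ===== PORT B =====
def stones_alt (n : Int) (a : Int) (b : Int) : List Int :=
  if a = b then [(n - 1) * a]
  else
    PySem.List.sorted
      (PySem.Set.ofList ((PySem.List.pyRange 0 n 1).map (fun i => a * i + b * (n - 1 - i))))
      (fun x => x) false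

-- ===== PRECONDITION & SPEC =====
def Spec_stones (n : Int) (a : Int) (b : Int) (out : List Int) : Prop := out = stones_alt n a b
instance (n : Int) (a : Int) (b : Int) (out : List Int) : Decidable (Spec_stones n a b out) := by unfold Spec_stones; infer_instance

-- ===== CLAIM (what is proved, stated in full; the proofs are below) =====
def Claim_equal_stones : Prop := ∀ (n : Int) (a : Int) (b : Int), Dom_stones n a b → Spec_stones n a b (stones n a b)

-- ===== LEMMAS AND PROOFS =====

-- the loop yields the arithmetic progression i, i+d, …, i+m*d
theorem stonesLoop_eq (m : Nat) (d : Int) (hd : 0 < d) (i : Int) :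
    stonesLoop (i + m * d) d hd i = (List.range (m + 1)).map (fun k : Nat => i + (k : Int) * d) := by
  induction m generalizing i with
  | zero =>
      rw [stonesLoop.eq_def, dif_pos (by norm_num)]
      rw [stonesLoop.eq_def, dif_neg (by simp only [Nat.cast_zero, zero_mul, add_zero]; omega)]
      simp
  | succ m ih =>
      rw [stonesLoop.eq_def, dif_pos (by push_cast; nlinarith)]
      have h1 : i + (↑(m + 1)) * d = (i + d) + (m : Int) * d := by push_cast; ring
      rw [h1, ih (i + d)]
      rw [show List.range (m + 1 + 1) = 0 :: (List.range (m + 1)).map Nat.succ from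
        List.range_succ_eq_map (n := m + 1)]
      rw [List.map_cons, List.map_map]
      congr 1
      · norm_num
      · apply List.map_congr_left
        intro k _
        simp only [Function.comp_apply]
        push_cast
        ring

theorem stonesLoop_nil (hi d : Int) (hd : 0 < d) (i : Int) (h : hi < i) :
    stonesLoop hi d hd i = [] := by
  rw [stonesLoop.eq_def, dif_neg (by omega)]

-- a list whose k-th entry is F (N-1-k) is the reverse of the map of G over range N
theorem map_range_eq_reverse {α : Type} (N : Nat) (F G : Nat → α)
    (h : ∀ k, k < N → F k = G (N - 1 - k)) :
    (List.range N).map F = ((List.range N).map G).reverse := by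
  apply List.ext_getElem
  · simp
  · intro j h1 h2
    simp only [List.length_map, List.length_range] at h1
    simp only [List.getElem_map, List.getElem_reverse, List.length_map, List.length_range,
      List.getElem_range]
    exact h j h1

theorem stones_eq_alt (n a b : Int) : stones n a b = stones_alt n a b := by
  by_cases h : a = b
  · simp [stones, stones_alt, h]
  · simp only [stones, stones_alt, dif_neg h, if_neg h]
    set low := if a < b then a else b with hlow
    set d := |a - b| with hd
    have hdpos : 0 < d := abs_pos.mpr (sub_ne_zero_of_ne h)
    by_cases hn : n ≤ 0
    · rw [stonesLoop_nil _ _ _ _ (by nlinarith)]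
      rw [PySem.List.pyRange_one_eq_nil hn]
      rfl
    · rw [not_le] at hn
      obtain ⟨m, hm⟩ : ∃ m : Nat, n - 1 = (m : Int) := ⟨(n - 1).toNat, by omega⟩
      have hsplit : (n - 1) * (low + d) = (n - 1) * low + (m : Int) * d := by
        rw [← hm]; ring
      rw [hsplit, stonesLoop_eq]
      -- the loop output is strictly increasing
      have hys : ((List.range (m + 1)).map (fun k : Nat => (n - 1) * low + (k : Int) * d)).Pairwise (· < ·) := by
        rw [List.pairwise_map]
        refine List.pairwise_lt_range.imp ?_
        intro p q hpq
        have hc : (p : Int) < (q : Int) := by exact_mod_cast hpq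
        nlinarith
      have hrange : PySem.List.pyRange 0 n 1 = (List.range (m + 1)).map (fun k : Nat => (k : Int)) := by
        rw [PySem.List.pyRange_one]
        have ht : (n - 0).toNat = m + 1 := by omega
        rw [ht]
        exact List.map_congr_left (fun k _ => by omega)
      have hC : (PySem.List.pyRange 0 n 1).map (fun i => a * i + b * (n - 1 - i))
          = (List.range (m + 1)).map (fun k : Nat => a * (k : Int) + b * (n - 1 - (k : Int))) := by
        rw [hrange, List.map_map]
        rfl
      have hperm : ((PySem.List.pyRange 0 n 1).map (fun i => a * i + b * (n - 1 - i))).Perm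
          ((List.range (m + 1)).map (fun k : Nat => (n - 1) * low + (k : Int) * d)) := by
        rw [hC]
        rcases lt_or_gt_of_ne h with hab | hab
        · -- a < b : low = a, d = b - a; candidates descend, list is the reverse
          have hlow' : low = a := by rw [hlow, if_pos hab]
          have hd' : d = b - a := by rw [hd, abs_of_neg (by omega)]; ring
          have hrev : (List.range (m + 1)).map (fun k : Nat => a * (k : Int) + b * (n - 1 - (k : Int)))
              = ((List.range (m + 1)).map (fun k : Nat => (n - 1) * low + (k : Int) * d)).reverse := by
            apply map_range_eq_reverse
            intro k hk
            have hc : ((m + 1 - 1 - k : Nat) : Int) = (m : Int) - (k : Int) := by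
              have : k ≤ m := by omega
              push_cast [Nat.cast_sub this]
              omega
            rw [hc, hlow', hd', ← hm]
            ring
          rw [hrev]
          exact List.reverse_perm _
        · -- a > b : low = b, d = a - b; candidates are exactly the loop output
          have hlow' : low = b := by rw [hlow, if_neg (by omega)]
          have hd' : d = a - b := by rw [hd, abs_of_pos (by omega)]
          apply List.Perm.of_eq
          apply List.map_congr_left
          intro k _
          rw [hlow', hd']
          ring
      have hnodup : ((PySem.List.pyRange 0 n 1).map (fun i => a * i + b * (n - 1 - i))).Nodup :=
        (hperm.nodup_iff).mpr (hys.imp ne_of_lt)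
      rw [PySem.Set.ofList_eq_self_of_nodup _ hnodup]
      exact (PySem.List.sorted_eq_of_perm_of_pairwise_lt _ _ _ hperm.symm hys).symm

-- ===== VERDICT (by name: the statement is the Claim_ definition above) =====
theorem stones_spec : Claim_equal_stones := by
  intro n a b _
  unfold Spec_stones
  exact stones_eq_alt n a b
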